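-- pv_equiv track=rewrite | github.com/tripsycodes/ARIMAA | god_heuristic.py | is_frozen
-- ===== SOURCE A (Python) =====
-- BOARD_SIZE = 8
--
-- piece_strength = {
--     "GE": 5, "GC": 4, "GH": 3, "GD": 2, "GT": 1, "GR": 0,
--     "SE": 5, "SC": 4, "SH": 3, "SD": 2, "ST": 1, "SR": 0,
--     " ": -1  # Empty space
-- }
--
-- def is_frozen(board, row, col):
--     """Check if a piece is frozen (surrounded by stronger enemy pieces)."""
--     if board[row][col] == "  ":
--         return False
--
--     piece = board[row][col]
--     player_prefix = piece[0]
--     strength = piece_strength[piece]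
--
--     # Check if any adjacent position has a stronger enemy piece
--     has_stronger_enemy = False
--     for dr, dc in [(0, 1), (1, 0), (0, -1), (-1, 0)]:
--         adj_row, adj_col = row + dr, col + dc
--         if 0 <= adj_row < BOARD_SIZE and 0 <= adj_col < BOARD_SIZE:
--             adj_piece = board[adj_row][adj_col]
--             if adj_piece != "  " and adj_piece[0] != player_prefix:
--                 if piece_strength[adj_piece] > strength:
--                     has_stronger_enemy = True
--                     break
--
--     if not has_stronger_enemy:
--         return False
--
--     # Check if any adjacent position has a friendly piece
--     for dr, dc in [(0, 1), (1, 0), (0, -1), (-1, 0)]: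
--         adj_row, adj_col = row + dr, col + dc
--         if 0 <= adj_row < BOARD_SIZE and 0 <= adj_col < BOARD_SIZE:
--             adj_piece = board[adj_row][adj_col]
--             if adj_piece != "  " and adj_piece[0] == player_prefix:
--                 return False  # Not frozen, has friendly support
--
--     return True  # Frozen: has stronger enemy and no friendly support
-- ===== SOURCE B (Python) =====
-- BOARD_SIZE = 8
--
-- piece_strength = {
--     "GE": 5, "GC": 4, "GH": 3, "GD": 2, "GT": 1, "GR": 0,
--     "SE": 5, "SC": 4, "SH": 3, "SD": 2, "ST": 1, "SR": 0,
--     " ": -1  # Empty space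
-- }
--
-- def is_frozen(board, row, col):
--     """Check if a piece is frozen: one sweep over the four neighbours
--     accumulating both 'stronger enemy' and 'friendly support' flags."""
--     cell = board[row][col]
--     if cell == "  ":
--         return False
--     owner = cell[0]
--     power = piece_strength[cell]
--     stronger_enemy = False
--     friendly = False
--     for dr, dc in ((0, 1), (1, 0), (0, -1), (-1, 0)):
--         r, c = row + dr, col + dc
--         if 0 <= r < BOARD_SIZE and 0 <= c < BOARD_SIZE:
--             nb = board[r][c]
--             if nb == "  ":
--                 continue
--             if nb[0] == owner:
--                 friendly = True
--             elif piece_strength[nb] > power: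
--                 stronger_enemy = True
--     return stronger_enemy and not friendly
-- ===== Notes on version B (the rewrite author's own statement) =====
-- stated objective: alternative
-- what changed: A makes two sequential sweeps over the four neighbours (first break-on-stronger-enemy, then return-on-friendly); B makes one sweep accumulating both flags (stronger_enemy, friendly) and returns stronger_enemy and not friendly.
-- outside the precondition, e.g. on is_frozen([['GR', 'SE'], ['XX', '  ']], 0, 0): A returns True, B raises KeyError; on is_frozen([[], ['  ', 'GR', 'SE'], ['  ', 'GT']], 1, 1): A returns False, B raises IndexError
import Mathlib
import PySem

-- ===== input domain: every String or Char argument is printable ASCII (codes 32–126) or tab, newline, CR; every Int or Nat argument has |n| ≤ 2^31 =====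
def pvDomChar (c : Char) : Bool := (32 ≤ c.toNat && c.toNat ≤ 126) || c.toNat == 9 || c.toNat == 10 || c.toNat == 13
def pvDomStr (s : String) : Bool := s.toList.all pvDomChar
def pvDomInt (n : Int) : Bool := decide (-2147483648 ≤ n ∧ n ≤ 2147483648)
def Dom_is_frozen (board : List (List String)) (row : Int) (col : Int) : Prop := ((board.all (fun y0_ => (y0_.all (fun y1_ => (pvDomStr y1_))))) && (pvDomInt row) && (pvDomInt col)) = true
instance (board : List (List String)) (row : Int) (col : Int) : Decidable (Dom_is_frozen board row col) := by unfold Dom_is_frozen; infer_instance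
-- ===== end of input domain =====

-- B replaces A's two sequential neighbour loops by one sweep accumulating both
-- flags (stronger-enemy, friendly-support); same return value, alternative structure.


-- shared board/dictionary helpers (plain transliterations of board[r][c] and piece_strength[s])
def pvCell (board : List (List String)) (r c : Int) : Option String :=
  match PySem.List.pyGet? board r with
  | some rw => PySem.List.pyGet? rw c
  | none => none

def pvStrength? (s : String) : Option Int :=
  if s = "GE" then some 5 else if s = "GC" then some 4 else if s = "GH" then some 3
  else if s = "GD" then some 2 else if s = "GT" then some 1 else if s = "GR" then some 0
  else if s = "SE" then some 5 else if s = "SC" then some 4 else if s = "SH" then some 3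
  else if s = "SD" then some 2 else if s = "ST" then some 1 else if s = "SR" then some 0
  else if s = " " then some (-1) else none

def pvHead (s : String) : Char := s.toList.headD ' '  -- s[0] with a dummy fallback (nonempty under Pre_)

def pvInB (r c : Int) : Bool := decide (0 ≤ r ∧ r < 8 ∧ 0 ≤ c ∧ c < 8)

def pvOffs : List (Int × Int) := [(0, 1), (1, 0), (0, -1), (-1, 0)]

-- ===== PORT A =====
-- first loop of A: break-on-first stronger enemy (none-branches are unreachable under Pre_)
def pvLoop1 (board : List (List String)) (row col : Int) (pfx : Char) (str : Int) :
    List (Int × Int) → Bool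
  | [] => false
  | d :: ds =>
    if pvInB (row + d.1) (col + d.2) then
      match pvCell board (row + d.1) (col + d.2) with
      | some adj =>
        if adj ≠ "  " ∧ pvHead adj ≠ pfx then
          if (pvStrength? adj).getD 0 > str then true
          else pvLoop1 board row col pfx str ds
        else pvLoop1 board row col pfx str ds
      | none => pvLoop1 board row col pfx str ds
    else pvLoop1 board row col pfx str ds

-- second loop of A: return-False-on-first friendly neighbour (true = friendly found)
def pvLoop2 (board : List (List String)) (row col : Int) (pfx : Char) :
    List (Int × Int) → Bool
  | [] => false
  | d :: ds =>
    if pvInB (row + d.1) (col + d.2) then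
      match pvCell board (row + d.1) (col + d.2) with
      | some adj =>
        if adj ≠ "  " ∧ pvHead adj = pfx then true
        else pvLoop2 board row col pfx ds
      | none => pvLoop2 board row col pfx ds
    else pvLoop2 board row col pfx ds

def is_frozen (board : List (List String)) (row : Int) (col : Int) : Bool :=
  match pvCell board row col with
  | none => false  -- Python raises IndexError here; excluded by Pre_
  | some piece =>
    if piece = "  " then false
    else
      let pfx := pvHead piece      -- piece[0] (piece nonempty under Pre_)
      let strength := (pvStrength? piece).getD 0
      let hasStrongerEnemy := pvLoop1 board row col pfx strength pvOffs
      if ¬ hasStrongerEnemy then false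
      else ! pvLoop2 board row col pfx pvOffs

-- ===== PORT B =====
-- one classification step of B's single sweep, updating both flags
def pvClassify (board : List (List String)) (row col : Int) (owner : Char) (power : Int)
    (st : Bool × Bool) (d : Int × Int) : Bool × Bool :=
  if pvInB (row + d.1) (col + d.2) then
    match pvCell board (row + d.1) (col + d.2) with
    | some nb =>
      if nb = "  " then st
      else if pvHead nb = owner then (st.1, true)
      else if (pvStrength? nb).getD 0 > power then (true, st.2)
      else st
    | none => st
  else st

def is_frozen_alt (board : List (List String)) (row : Int) (col : Int) : Bool :=
  match pvCell board row col with
  | none => false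
  | some cell =>
    if cell = "  " then false
    else
      let owner := pvHead cell
      let power := (pvStrength? cell).getD 0
      let st := pvOffs.foldl (pvClassify board row col owner power) (false, false)
      st.1 && ! st.2

-- ===== PRECONDITION & SPEC =====
-- Pre_ admits every input on which all lookups succeed: the centre cell exists
-- (Python's negative-index wraparound included) and, when it is not "  ", the
-- piece is a key of piece_strength and every in-bounds neighbour cell exists and
-- is "  ", friendly (same owner prefix), or a key of piece_strength.  It excludes
-- only inputs where A returns solely because an early break / early return skips
-- a garbage or missing neighbour cell that any full sweep (B) would raise on.
def pvPreB (board : List (List String)) (row col : Int) : Bool :=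
  match pvCell board row col with
  | none => false
  | some p =>
    (p == "  ") ||
    ((pvStrength? p).isSome &&
      pvOffs.all (fun d =>
        !(pvInB (row + d.1) (col + d.2)) ||
        (match pvCell board (row + d.1) (col + d.2) with
         | some nb => (nb == "  ") || (pvHead nb == pvHead p) || (pvStrength? nb).isSome
         | none => false)))

def Pre_is_frozen (board : List (List String)) (row : Int) (col : Int) : Prop :=
  pvPreB board row col = true
instance (board : List (List String)) (row : Int) (col : Int) : Decidable (Pre_is_frozen board row col) := by unfold Pre_is_frozen; infer_instance

def pvWitness_is_frozen : List (List String) × Int × Int :=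
  ([["GR", "SE"], ["  ", "  "]], 0, 0)

def Spec_is_frozen (board : List (List String)) (row : Int) (col : Int) (out : Bool) : Prop := out = is_frozen_alt board row col
instance (board : List (List String)) (row : Int) (col : Int) (out : Bool) : Decidable (Spec_is_frozen board row col out) := by unfold Spec_is_frozen; infer_instance

-- ===== CLAIM (what is proved, stated in full; the proofs are below) =====
def Claim_equal_is_frozen : Prop := ∀ (board : List (List String)) (row : Int) (col : Int), Dom_is_frozen board row col → Pre_is_frozen board row col → Spec_is_frozen board row col (is_frozen board row col)

-- ===== LEMMAS AND PROOFS =====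
-- per-offset characterisations
def pvEnemy (board : List (List String)) (row col : Int) (pfx : Char) (str : Int)
    (d : Int × Int) : Bool :=
  pvInB (row + d.1) (col + d.2) &&
  (match pvCell board (row + d.1) (col + d.2) with
   | some adj => (adj != "  ") && (pvHead adj != pfx) && decide ((pvStrength? adj).getD 0 > str)
   | none => false)

def pvFriend (board : List (List String)) (row col : Int) (pfx : Char)
    (d : Int × Int) : Bool :=
  pvInB (row + d.1) (col + d.2) &&
  (match pvCell board (row + d.1) (col + d.2) with
   | some adj => (adj != "  ") && (pvHead adj == pfx)
   | none => false)

theorem pvLoop1_any (board : List (List String)) (row col : Int) (pfx : Char) (str : Int)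
    (ds : List (Int × Int)) :
    pvLoop1 board row col pfx str ds = ds.any (pvEnemy board row col pfx str) := by
  induction ds with
  | nil => rfl
  | cons d ds ih =>
    simp only [pvLoop1, pvEnemy, List.any_cons, ih]
    cases h : pvInB (row + d.1) (col + d.2) <;> simp only [h, Bool.false_and, Bool.true_and, Bool.false_or, if_neg Bool.false_ne_true, if_pos rfl]
    cases hc : pvCell board (row + d.1) (col + d.2)
    · simp
    · rename_i adj
      by_cases h1 : adj = "  "
      · simp [h1]
      · by_cases h2 : pvHead adj = pfx
        · simp [h1, h2]
        · have e1 : (adj == "  ") = false := by simp [h1]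
          have e2 : (pvHead adj == pfx) = false := by simp [h2]
          by_cases h3 : (pvStrength? adj).getD 0 > str <;> simp [h1, h2, h3, e1, e2]

theorem pvLoop2_any (board : List (List String)) (row col : Int) (pfx : Char)
    (ds : List (Int × Int)) :
    pvLoop2 board row col pfx ds = ds.any (pvFriend board row col pfx) := by
  induction ds with
  | nil => rfl
  | cons d ds ih =>
    simp only [pvLoop2, pvFriend, List.any_cons, ih]
    cases h : pvInB (row + d.1) (col + d.2) <;> simp only [h, Bool.false_and, Bool.true_and, Bool.false_or, if_neg Bool.false_ne_true, if_pos rfl]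
    cases hc : pvCell board (row + d.1) (col + d.2)
    · simp
    · rename_i adj
      by_cases h1 : adj = "  "
      · simp [h1]
      · by_cases h2 : pvHead adj = pfx
        · have e1 : (adj == "  ") = false := by simp [h1]
          simp [h1, h2, e1]
        · simp [h1, h2]

theorem pvClassify_foldl (board : List (List String)) (row col : Int) (owner : Char)
    (power : Int) (ds : List (Int × Int)) (e f : Bool) :
    ds.foldl (pvClassify board row col owner power) (e, f) =
      (e || ds.any (pvEnemy board row col owner power),
       f || ds.any (pvFriend board row col owner)) := by
  induction ds generalizing e f with
  | nil => simp
  | cons d ds ih =>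
    simp only [List.foldl_cons, List.any_cons, ih]
    have hstep : pvClassify board row col owner power (e, f) d =
        (e || pvEnemy board row col owner power d,
         f || pvFriend board row col owner d) := by
      simp only [pvClassify, pvEnemy, pvFriend]
      cases h : pvInB (row + d.1) (col + d.2) <;> simp only [h, Bool.false_and, Bool.true_and, Bool.false_or, Bool.or_false, if_neg Bool.false_ne_true, if_pos rfl]
      cases hc : pvCell board (row + d.1) (col + d.2)
      · simp
      · rename_i nb
        by_cases h1 : nb = "  "
        · simp [h1]
        · have e1 : (nb == "  ") = false := by simp [h1]
          have e1b : (nb != "  ") = true := by simp [bne_iff_ne, h1]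
          by_cases h2 : pvHead nb = owner
          · simp [h1, h2, e1, e1b]
          · have e3 : (pvHead nb == owner) = false := by simp [h2]
            by_cases h3 : (pvStrength? nb).getD 0 > power <;> simp [h1, h2, h3, e1, e3]
    rw [hstep]
    cases pvEnemy board row col owner power d <;>
      cases pvFriend board row col owner d <;> simp [Bool.or_assoc]

-- ===== VERDICT (by name: the statement is the Claim_ definition above) =====
theorem is_frozen_spec : Claim_equal_is_frozen := by
  intro board row col _ _
  unfold Spec_is_frozen is_frozen is_frozen_alt
  cases hc : pvCell board row col with
  | none => rfl
  | some piece =>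
    by_cases hp : piece = "  "
    · simp [hp]
    · simp only [hp, if_neg hp]
      rw [pvLoop1_any, pvLoop2_any, pvClassify_foldl]
      cases pvOffs.any (pvEnemy board row col (pvHead piece) ((pvStrength? piece).getD 0)) <;>
        cases pvOffs.any (pvFriend board row col (pvHead piece)) <;> simp
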